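-- pv_equiv track=rewrite | github.com/Axionatic/Mystery-Manager | benchmark_extraction.py | _match_sheet_name
-- ===== SOURCE A (Python) =====
-- def _match_sheet_name(returned: str, available: list[str]) -> str | None:
--     """
--     Fuzzy-match a returned sheet name against available sheet names.
--
--     Tries: exact → case-insensitive → substring match.
--     """
--     returned = returned.strip().strip("'\"")
--
--     # Exact
--     if returned in available:
--         return returned
--
--     # Case-insensitive
--     lower_map = {s.lower(): s for s in available}
--     if returned.lower() in lower_map:
--         return lower_map[returned.lower()]
--
--     # Substring (returned is substring of available, or vice versa)
--     ret_lower = returned.lower()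
--     for s in available:
--         if ret_lower in s.lower() or s.lower() in ret_lower:
--             return s
--
--     return None
-- ===== SOURCE B (Python) =====
-- def _match_sheet_name(returned: str, available: list[str]) -> str | None:
--     """Single-pass re-implementation: one scan over `available` keeping an
--     exact-hit flag, the last case-insensitive match and the first substring
--     match, resolved by priority afterwards."""
--     returned = returned.strip().strip("'\"")
--     ret_lower = returned.lower()
--     exact = False
--     ci = None
--     sub = None
--     for s in available:
--         s_lower = s.lower()
--         if s == returned:
--             exact = True
--         if s_lower == ret_lower:
--             ci = s
--         if sub is None and (ret_lower in s_lower or s_lower in ret_lower):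
--             sub = s
--     if exact:
--         return returned
--     if ci is not None:
--         return ci
--     return sub
-- ===== Notes on version B (the rewrite author's own statement) =====
-- stated objective: faster
-- what changed: Replaced A's three separate scans (membership test, lower-case dict build + lookup, substring loop) by a single pass that maintains an exact-hit flag, the last case-insensitive match and the first substring match, resolved by priority after the loop.
import Mathlib
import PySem

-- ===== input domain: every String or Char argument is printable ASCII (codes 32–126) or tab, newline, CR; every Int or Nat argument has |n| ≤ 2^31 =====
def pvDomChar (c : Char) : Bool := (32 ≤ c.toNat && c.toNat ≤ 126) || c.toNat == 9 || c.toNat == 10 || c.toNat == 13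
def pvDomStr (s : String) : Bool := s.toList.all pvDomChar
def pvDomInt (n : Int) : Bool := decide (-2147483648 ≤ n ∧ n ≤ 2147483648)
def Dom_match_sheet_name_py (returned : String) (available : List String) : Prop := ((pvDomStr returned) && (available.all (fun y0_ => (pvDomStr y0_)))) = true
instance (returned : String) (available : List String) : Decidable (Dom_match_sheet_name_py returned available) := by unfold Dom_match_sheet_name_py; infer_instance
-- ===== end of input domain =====

-- B merges A's three scans (membership, lower-case dict + lookup, substring loop)
-- into one pass with an exact flag / last case-insensitive match / first substring match.

-- ===== PORT A =====
-- the 'for s in available: if …: return s' substring loop of A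
def pvA_subLoop (rl : String) : List String → Option String
  | [] => none
  | s :: rest =>
    if PySem.Str.isIn rl (PySem.Str.lower s) || PySem.Str.isIn (PySem.Str.lower s) rl then some s
    else pvA_subLoop rl rest

def match_sheet_name_py (returned : String) (available : List String) : Option String :=
  let r := PySem.Str.stripChars (PySem.Str.strip returned) "'\""
  if available.contains r then some r
  else
    let lowerMap := available.foldl (fun d s => d.insert (PySem.Str.lower s) s)
      (PySem.Dict.empty : PySem.Dict String String)
    match lowerMap.get? (PySem.Str.lower r) with
    | some v => some v
    | none => pvA_subLoop (PySem.Str.lower r) available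

-- ===== PORT B =====
-- one loop body: (exact flag, last case-insensitive match, first substring match)
def pvB_step (r rl : String) (st : Bool × Option String × Option String) (s : String) :
    Bool × Option String × Option String :=
  let sl := PySem.Str.lower s
  ((if s == r then true else st.1),
   (if sl == rl then some s else st.2.1),
   (if st.2.2.isNone && (PySem.Str.isIn rl sl || PySem.Str.isIn sl rl) then some s else st.2.2))

def match_sheet_name_py_alt (returned : String) (available : List String) : Option String :=
  let r := PySem.Str.stripChars (PySem.Str.strip returned) "'\""
  let rl := PySem.Str.lower r
  let st := available.foldl (pvB_step r rl) (false, none, none)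
  if st.1 then some r
  else
    match st.2.1 with
    | some c => some c
    | none => st.2.2

-- ===== PRECONDITION & SPEC =====
def Spec_match_sheet_name_py (returned : String) (available : List String) (out : Option String) : Prop := out = match_sheet_name_py_alt returned available
instance (returned : String) (available : List String) (out : Option String) : Decidable (Spec_match_sheet_name_py returned available out) := by unfold Spec_match_sheet_name_py; infer_instance

-- ===== CLAIM (what is proved, stated in full; the proofs are below) =====
def Claim_equal_match_sheet_name_py : Prop := ∀ (returned : String) (available : List String), Dom_match_sheet_name_py returned available → Spec_match_sheet_name_py returned available (match_sheet_name_py returned available)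

-- ===== LEMMAS AND PROOFS =====

-- A's dict of lowered keys looks up the LAST element with that lowered value
lemma pv_dict_foldl_get (l : List String) (d : PySem.Dict String String) (k : String) :
    (l.foldl (fun d s => d.insert (PySem.Str.lower s) s) d).get? k =
      match l.reverse.find? (fun s => PySem.Str.lower s == k) with
      | some s => some s
      | none => d.get? k := by
  induction l generalizing d with
  | nil => simp
  | cons a t ih =>
    simp only [List.foldl_cons, ih, List.reverse_cons, List.find?_append]
    cases h : t.reverse.find? (fun s => PySem.Str.lower s == k) with
    | some s => simp [Option.or]
    | none =>
      simp only [Option.none_or, List.find?_singleton]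
      cases hk : (PySem.Str.lower a == k) with
      | true => simp [eq_of_beq hk]
      | false =>
        have hne : k ≠ PySem.Str.lower a := fun he => by simp [he] at hk
        simp [PySem.Dict.get?_insert, hne]

-- A's substring loop is List.find?
lemma pv_subLoop_eq_find? (rl : String) (l : List String) :
    pvA_subLoop rl l =
      l.find? (fun s => PySem.Str.isIn rl (PySem.Str.lower s) || PySem.Str.isIn (PySem.Str.lower s) rl) := by
  induction l with
  | nil => rfl
  | cons a t ih =>
    rw [pvA_subLoop, List.find?_cons]
    cases h : (PySem.Str.isIn rl (PySem.Str.lower a) || PySem.Str.isIn (PySem.Str.lower a) rl) <;>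
      simp [ih]

-- B's fold computes exactly (membership flag, last ci match, first substring match)
lemma pv_bfold_char (r rl : String) (l : List String) (e : Bool) (c su : Option String) :
    l.foldl (pvB_step r rl) (e, c, su) =
      (e || l.contains r,
       (match l.reverse.find? (fun s => PySem.Str.lower s == rl) with
        | some s => some s
        | none => c),
       (match su with
        | some x => some x
        | none => l.find? (fun s => PySem.Str.isIn rl (PySem.Str.lower s) || PySem.Str.isIn (PySem.Str.lower s) rl))) := by
  induction l generalizing e c su with
  | nil => cases su <;> simp
  | cons a t ih =>
    simp only [List.foldl_cons, pvB_step, ih, List.reverse_cons, List.find?_append,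
      List.contains_cons, List.find?_cons]
    have h1' : (r == a) = (a == r) := by simp [eq_comm]
    cases h1 : (a == r) <;>
      cases h2 : (PySem.Str.lower a == rl) <;>
        cases h3 : t.reverse.find? (fun s => PySem.Str.lower s == rl) <;>
          cases su <;>
            cases hp : (PySem.Str.isIn rl (PySem.Str.lower a) || PySem.Str.isIn (PySem.Str.lower a) rl) <;>
              simp [h1, h1', Option.or]

-- ===== VERDICT (by name: the statement is the Claim_ definition above) =====
theorem match_sheet_name_py_spec : Claim_equal_match_sheet_name_py := by
  intro returned available _
  unfold Spec_match_sheet_name_py match_sheet_name_py match_sheet_name_py_alt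
  simp only [pv_bfold_char, pv_subLoop_eq_find?, pv_dict_foldl_get, PySem.Dict.get?_empty,
    Bool.false_or]
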